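-- pv_equiv track=rewrite | github.com/Zer0pa/ZPE-Image | scripts/geogram4_l2_image_eval.py | _pack_words_20bit
-- ===== SOURCE A (Python) =====
-- def _pack_words_20bit(words: list[int]) -> int:
--     bits = 0
--     count = 0
--     accumulator = 0
--     for word in words:
--         accumulator |= int(word) << bits
--         bits += 20
--         while bits >= 8:
--             accumulator >>= 8
--             bits -= 8
--             count += 1
--     if bits:
--         count += 1
--     return count
-- ===== SOURCE B (Python) =====
-- def _pack_words_20bit(words: list[int]) -> int:
--     # Each word contributes exactly 20 bits; bytes needed = ceil(20*n / 8) = (5*n + 1) // 2.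
--     return (5 * len(words) + 1) // 2
-- ===== Notes on version B (the rewrite author's own statement) =====
-- stated objective: faster
-- what changed: Replaces the bit-accumulator loop (which only ever counts 20 bits per word) by the closed form (5*len(words)+1)//2.
import Mathlib
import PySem

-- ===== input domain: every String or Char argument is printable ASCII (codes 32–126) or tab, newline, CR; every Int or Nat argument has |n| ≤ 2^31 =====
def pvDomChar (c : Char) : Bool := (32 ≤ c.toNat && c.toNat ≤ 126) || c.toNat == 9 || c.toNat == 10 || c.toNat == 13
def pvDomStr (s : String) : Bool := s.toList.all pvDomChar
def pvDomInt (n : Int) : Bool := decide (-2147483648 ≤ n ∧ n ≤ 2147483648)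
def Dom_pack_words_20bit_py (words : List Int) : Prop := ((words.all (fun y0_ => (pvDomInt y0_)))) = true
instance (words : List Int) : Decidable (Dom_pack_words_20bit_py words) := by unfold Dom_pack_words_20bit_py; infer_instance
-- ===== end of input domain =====

-- B replaces A's per-word bit-accumulator loop by the closed form (5*len(words)+1)//2 (objective: faster).

-- ===== PORT A =====
-- inner `while bits >= 8` loop; state (bits, count, accumulator); `accumulator >>= 8` on a
-- Python int is arithmetic shift = floor division by 256 (exact via PySem.Int.floordiv)
def pvWhileA (bits count acc : Int) : Int × Int × Int :=
  if 8 ≤ bits then pvWhileA (bits - 8) (count + 1) (PySem.Int.floordiv acc 256)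
  else (bits, count, acc)
termination_by bits.toNat
decreasing_by omega

-- one iteration of the `for word in words` body (bits is always ≥ 0, so `<< bits` = * 2^bits.toNat)
def pvStepA (s : Int × Int × Int) (word : Int) : Int × Int × Int :=
  pvWhileA (s.1 + 20) s.2.1 (Int.lor s.2.2 (word * 2 ^ s.1.toNat))

def pvFinishA (st : Int × Int × Int) : Int :=
  if st.1 ≠ 0 then st.2.1 + 1 else st.2.1

def pack_words_20bit_py (words : List Int) : Int :=
  pvFinishA (words.foldl pvStepA (0, 0, 0))

-- ===== PORT B =====
def pack_words_20bit_py_alt (words : List Int) : Int :=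
  PySem.Int.floordiv (5 * (words.length : Int) + 1) 2

-- ===== PRECONDITION & SPEC =====
def Spec_pack_words_20bit_py (words : List Int) (out : Int) : Prop := out = pack_words_20bit_py_alt words
instance (words : List Int) (out : Int) : Decidable (Spec_pack_words_20bit_py words out) := by unfold Spec_pack_words_20bit_py; infer_instance

-- ===== CLAIM (what is proved, stated in full; the proofs are below) =====
def Claim_equal_pack_words_20bit_py : Prop := ∀ (words : List Int), Dom_pack_words_20bit_py words → Spec_pack_words_20bit_py words (pack_words_20bit_py words)

-- ===== LEMMAS AND PROOFS =====

lemma pvWhileA_20 (c a : Int) :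
    pvWhileA 20 c a = (4, c + 2, PySem.Int.floordiv (PySem.Int.floordiv a 256) 256) := by
  rw [pvWhileA]; norm_num
  rw [pvWhileA]; norm_num
  rw [pvWhileA]; norm_num
  ring

lemma pvWhileA_24 (c a : Int) :
    pvWhileA 24 c a
      = (0, c + 3,
         PySem.Int.floordiv (PySem.Int.floordiv (PySem.Int.floordiv a 256) 256) 256) := by
  rw [pvWhileA]; norm_num
  rw [pvWhileA]; norm_num
  rw [pvWhileA]; norm_num
  rw [pvWhileA]; norm_num
  ring

-- loop invariant: starting the for-loop with bits = 0 (resp. 4) and count = c, the final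
-- returned count is c + (5n+1)/2 (resp. c + (5n+2)/2), n the number of remaining words
lemma pvLoopA (ws : List Int) : ∀ (c a : Int),
    pvFinishA (List.foldl pvStepA (0, c, a) ws) = c + (((5 * ws.length + 1) / 2 : Nat) : Int)
    ∧ pvFinishA (List.foldl pvStepA (4, c, a) ws) = c + (((5 * ws.length + 2) / 2 : Nat) : Int) := by
  induction ws with
  | nil => intro c a; simp [pvFinishA]
  | cons w ws ih =>
    intro c a
    constructor
    · rw [List.foldl_cons]
      simp only [pvStepA]
      rw [show ((0 : Int) + 20) = 20 from by norm_num, pvWhileA_20, (ih (c + 2) _).2]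
      have hlen : (w :: ws).length = ws.length + 1 := rfl
      rw [hlen]
      have : ((5 * (ws.length + 1) + 1) / 2 : Nat) = ((5 * ws.length + 2) / 2 : Nat) + 2 := by
        omega
      rw [this]; push_cast; ring
    · rw [List.foldl_cons]
      simp only [pvStepA]
      rw [show ((4 : Int) + 20) = 24 from by norm_num, pvWhileA_24, (ih (c + 3) _).1]
      have hlen : (w :: ws).length = ws.length + 1 := rfl
      rw [hlen]
      have : ((5 * (ws.length + 1) + 2) / 2 : Nat) = ((5 * ws.length + 1) / 2 : Nat) + 3 := by
        omega
      rw [this]; push_cast; ring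

-- ===== VERDICT (by name: the statement is the Claim_ definition above) =====
theorem pack_words_20bit_py_spec : Claim_equal_pack_words_20bit_py := by
  intro words _
  unfold Spec_pack_words_20bit_py pack_words_20bit_py pack_words_20bit_py_alt
  rw [(pvLoopA words 0 0).1]
  have : (5 : Int) * (words.length : Int) + 1 = ((5 * words.length + 1 : Nat) : Int) := by
    push_cast; ring
  rw [this]
  rw [show (2 : Int) = ((2 : Nat) : Int) from rfl, PySem.Int.floordiv_natCast]
  ring
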